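-- pv_equiv track=rewrite | github.com/yellowbrickorg/yellowbrick | bsf/views/base.py | get_map_of_ways
-- ===== SOURCE A (Python) =====
-- MAX_DEPTH = 3
--
-- def get_map_of_ways(list_of_ways):
--     result = {}
--     for i in range(MAX_DEPTH + 2):
--         result[i] = []
--
--     for way in list_of_ways:
--         if way not in result[len(way)]:
--             result[len(way)].append(way)
--
--     return result
-- ===== SOURCE B (Python) =====
-- MAX_DEPTH = 3
--
--
-- def get_map_of_ways(list_of_ways):
--     # Loop over the five keys instead of over the ways: each bucket is the
--     # order-preserving dedup of the ways of exactly that length.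
--     return {k: list(dict.fromkeys(w for w in list_of_ways if len(w) == k))
--             for k in range(MAX_DEPTH + 2)}
-- ===== Notes on version B (the rewrite author's own statement) =====
-- stated objective: simpler
-- what changed: B is a one-line dict comprehension looping over the five keys, building each bucket by filtering the input for that length and deduplicating it once with dict.fromkeys, instead of A's single pass over the ways that mutates a dict and scans the growing bucket per way.
import Mathlib
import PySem

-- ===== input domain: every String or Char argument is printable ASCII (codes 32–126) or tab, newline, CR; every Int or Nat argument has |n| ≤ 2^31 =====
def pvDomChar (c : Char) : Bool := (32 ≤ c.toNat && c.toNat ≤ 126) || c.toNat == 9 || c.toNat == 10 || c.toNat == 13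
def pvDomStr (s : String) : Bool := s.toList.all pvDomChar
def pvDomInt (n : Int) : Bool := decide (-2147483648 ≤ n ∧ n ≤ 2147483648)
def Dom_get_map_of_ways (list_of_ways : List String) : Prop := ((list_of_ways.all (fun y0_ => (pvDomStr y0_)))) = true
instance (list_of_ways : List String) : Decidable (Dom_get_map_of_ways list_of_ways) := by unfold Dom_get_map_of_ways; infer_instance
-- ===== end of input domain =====

-- B loops over the five keys and builds each bucket by filtering + dedup,
-- instead of A's single pass over the ways mutating a dict (objective: simpler).

-- ===== PORT A =====
def get_map_of_ways (list_of_ways : List String) : List (Int × List String) :=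
  let result0 : PySem.Dict Int (List String) :=
    (PySem.List.pyRange 0 (3 + 2) 1).foldl (fun d i => d.insert i []) PySem.Dict.empty
  -- result[len(way)] raises KeyError when len(way) > 4; Pre_ excludes those inputs,
  -- so the getD default is never the value used inside Pre_.
  let result := list_of_ways.foldl (fun d way =>
    let b := d.getD (PySem.Str.len way) []
    if b.contains way then d
    else d.insert (PySem.Str.len way) (b ++ [way])) result0
  result.items

-- ===== PORT B =====
def get_map_of_ways_alt (list_of_ways : List String) : List (Int × List String) :=
  (PySem.List.pyRange 0 (3 + 2) 1).map (fun k =>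
    (k, PySem.List.dedup (list_of_ways.filter (fun w => PySem.Str.len w == k))))

-- ===== PRECONDITION & SPEC =====
-- Pre_ excludes lists containing a way longer than MAX_DEPTH + 1 = 4 characters:
-- on those A raises KeyError at result[len(way)].
def Pre_get_map_of_ways (list_of_ways : List String) : Prop :=
  ∀ w ∈ list_of_ways, PySem.Str.len w ≤ 4
instance (list_of_ways : List String) : Decidable (Pre_get_map_of_ways list_of_ways) := by
  unfold Pre_get_map_of_ways; infer_instance

def pvWitness_get_map_of_ways : List String := ["ab", "c", "ab", "", "abcd"]

def Spec_get_map_of_ways (list_of_ways : List String) (out : List (Int × List String)) : Prop := out = get_map_of_ways_alt list_of_ways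
instance (list_of_ways : List String) (out : List (Int × List String)) : Decidable (Spec_get_map_of_ways list_of_ways out) := by unfold Spec_get_map_of_ways; infer_instance

-- ===== CLAIM (what is proved, stated in full; the proofs are below) =====
def Claim_equal_get_map_of_ways : Prop := ∀ (list_of_ways : List String), Dom_get_map_of_ways list_of_ways → Pre_get_map_of_ways list_of_ways → Spec_get_map_of_ways list_of_ways (get_map_of_ways list_of_ways)

-- ===== LEMMAS AND PROOFS =====

-- The seeded dict {0:[],…,4:[]} of A's first loop.
def pvSeed : PySem.Dict Int (List String) :=
  (PySem.List.pyRange 0 (3 + 2) 1).foldl (fun d i => d.insert i []) PySem.Dict.empty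

lemma pvSeed_keys : pvSeed.keys = [0, 1, 2, 3, 4] := by decide

lemma pvSeed_getD (k : Int) : pvSeed.getD k [] = [] := by
  have h : pvSeed = PySem.Dict.mk [(0, []), (1, []), (2, []), (3, []), (4, [])] := by decide
  rw [h, PySem.Dict.getD_eq_get?_getD]
  simp only [PySem.Dict.get?_mk_cons]
  split_ifs <;> rfl

-- A's loop, bucket at key k: the ways of length k are folded with Set.add.
lemma foldA_getD (lw : List String) (d : PySem.Dict Int (List String)) (k : Int) :
    (lw.foldl (fun d way =>
        let b := d.getD (PySem.Str.len way) []
        if b.contains way then d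
        else d.insert (PySem.Str.len way) (b ++ [way])) d).getD k []
      = (lw.filter (fun w => PySem.Str.len w == k)).foldl PySem.Set.add (d.getD k []) := by
  induction lw generalizing d with
  | nil => rfl
  | cons w t ih =>
    simp only [List.foldl_cons, List.filter_cons]
    by_cases hk : PySem.Str.len w = k
    · subst hk
      simp only [beq_self_eq_true, if_pos, List.foldl_cons]
      rw [ih]
      congr 1
      by_cases hc : (d.getD (PySem.Str.len w) []).contains w
      · rw [if_pos hc]; unfold PySem.Set.add
        rw [if_pos (show PySem.Set.contains (d.getD (PySem.Str.len w) []) w = true from hc)]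
      · rw [if_neg hc]; unfold PySem.Set.add
        rw [if_neg (show ¬PySem.Set.contains (d.getD (PySem.Str.len w) []) w = true from hc),
            PySem.Dict.getD_insert_self]
    · have hbeq : (PySem.Str.len w == k) = false := beq_eq_false_iff_ne.mpr hk
      simp only [hbeq, if_neg, Bool.false_eq_true, not_false_iff]
      rw [ih]
      congr 1
      by_cases hc : (d.getD (PySem.Str.len w) []).contains w
      · rw [if_pos hc]
      · rw [if_neg hc]; exact PySem.Dict.getD_insert_of_ne _ _ _ (fun h => hk h.symm)

-- A's loop inserts only at keys the dict already has, so keys are preserved.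
lemma foldA_keys (lw : List String) (d : PySem.Dict Int (List String))
    (h : ∀ w ∈ lw, PySem.Str.len w ∈ d.keys) :
    (lw.foldl (fun d way =>
        let b := d.getD (PySem.Str.len way) []
        if b.contains way then d
        else d.insert (PySem.Str.len way) (b ++ [way])) d).keys = d.keys := by
  induction lw generalizing d with
  | nil => rfl
  | cons w t ih =>
    simp only [List.foldl_cons]
    by_cases hc : (d.getD (PySem.Str.len w) []).contains w
    · simp only [hc, if_pos]
      exact ih d (fun x hx => h x (List.mem_cons_of_mem _ hx))
    · simp only [hc, Bool.false_eq_true, if_neg, not_false_iff]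
      have hkeys : ((d.insert (PySem.Str.len w) (d.getD (PySem.Str.len w) [] ++ [w]))).keys = d.keys :=
        PySem.Dict.keys_insert_of_contains d _
          ((PySem.Dict.contains_iff_mem_keys d _).2 (h w (List.mem_cons_self)))
      rw [ih _ (fun x hx => by rw [hkeys]; exact h x (List.mem_cons_of_mem _ hx)), hkeys]

lemma len_mem_seed_keys (w : String) (h : PySem.Str.len w ≤ 4) :
    PySem.Str.len w ∈ pvSeed.keys := by
  have h0 : (0 : Int) ≤ PySem.Str.len w := by
    rw [PySem.Str.len_eq]; positivity
  rw [pvSeed_keys]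
  simp only [List.mem_cons, List.not_mem_nil, or_false]
  omega

-- dedup is exactly the Set.add fold starting from [].
lemma dedup_eq_foldl_add (l : List String) :
    PySem.List.dedup l = l.foldl PySem.Set.add [] := rfl

-- ===== VERDICT (by name: the statement is the Claim_ definition above) =====
theorem get_map_of_ways_spec : Claim_equal_get_map_of_ways := by
  intro lw _ hpre
  unfold Spec_get_map_of_ways get_map_of_ways get_map_of_ways_alt
  show (lw.foldl _ pvSeed).items = _
  have hmem : ∀ w ∈ lw, PySem.Str.len w ∈ pvSeed.keys :=
    fun w hw => len_mem_seed_keys w (hpre w hw)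
  have hAkeys := foldA_keys lw pvSeed hmem
  have hnodup : pvSeed.keys.Nodup := by rw [pvSeed_keys]; decide
  rw [PySem.Dict.items_eq_map_keys _ (hAkeys ▸ hnodup) [], hAkeys, pvSeed_keys]
  have hrange : PySem.List.pyRange 0 (3 + 2) 1 = [0, 1, 2, 3, 4] := by decide
  rw [hrange]
  refine List.map_congr_left (fun k _ => ?_)
  rw [foldA_getD, pvSeed_getD, dedup_eq_foldl_add]
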